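-- pv_equiv track=rewrite | github.com/CopticScriptorium/coptic-nlp | eval/marmot.py | marmotify
-- ===== SOURCE A (Python) =====
-- punctuation = set([".","·","·",":",",","-","ⲻ","·ⲻ","⳾","?",".ⲻ","—","†","=","]","⸱","].","⸓","⳾ⲻ","[","--","·]","··","☧",".]]","[·]","ⲻ·","=–.","̣","."])
--
-- def marmotify(indata,train=False):
-- 	output = []
-- 	counter = 0
-- 	for line in indata.strip().split("\n"):
-- 		fields = line.split("\t")
-- 		if train:
-- 			output.append("\t".join([str(counter),fields[0],fields[1],"_"]))
-- 		else:
-- 			output.append(line)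
-- 		counter +=1
-- 		if fields[0] in punctuation:
-- 			output.append("")
-- 			counter = 0
-- 	return "\n".join(output) + "\n"
-- ===== SOURCE B (Python) =====
-- punctuation = set([".","·","·",":",",","-","ⲻ","·ⲻ","⳾","?",".ⲻ","—","†","=","]","⸱","].","⸓","⳾ⲻ","[","--","·]","··","☧",".]]","[·]","ⲻ·","=–.","̣","."])
--
-- def marmotify(indata, train=False):
--     # Phase 1: partition the lines into segments, each ending at (and
--     # including) a punctuation token; the final run may end without one.
--     segments = []
--     current = []
--     for line in indata.strip().split("\n"):
--         current.append(line)
--         if line.split("\t")[0] in punctuation: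
--             segments.append((current, True))
--             current = []
--     if current:
--         segments.append((current, False))
--     # Phase 2: emit each segment, numbering its lines from 0 in train mode,
--     # with a blank line after every segment that ended on punctuation.
--     pieces = []
--     for segment, ended_on_punct in segments:
--         for i, line in enumerate(segment):
--             if train:
--                 fields = line.split("\t")
--                 pieces.append("\t".join([str(i), fields[0], fields[1], "_"]))
--             else:
--                 pieces.append(line)
--         if ended_on_punct:
--             pieces.append("")
--     return "\n".join(pieces) + "\n"
-- ===== Notes on version B (the rewrite author's own statement) =====
-- stated objective: alternative
-- what changed: Replaces A's single pass with a running counter that is reset in-flight by a two-phase decomposition: first partition the lines into punctuation-terminated segments, then emit each segment with enumerate-based numbering and a trailing blank per punctuation-ended segment.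
import Mathlib
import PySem

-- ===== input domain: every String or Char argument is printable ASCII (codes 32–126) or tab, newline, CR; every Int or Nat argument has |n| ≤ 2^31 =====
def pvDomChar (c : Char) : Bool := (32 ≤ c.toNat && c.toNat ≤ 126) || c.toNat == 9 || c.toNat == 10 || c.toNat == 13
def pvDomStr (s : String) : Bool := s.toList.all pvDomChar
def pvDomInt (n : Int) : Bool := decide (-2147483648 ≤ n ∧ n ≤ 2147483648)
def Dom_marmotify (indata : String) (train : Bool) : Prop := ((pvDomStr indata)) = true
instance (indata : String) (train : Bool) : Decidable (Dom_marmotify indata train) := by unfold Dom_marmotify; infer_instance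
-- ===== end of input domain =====

-- B re-derives the per-line counters by first splitting the lines into punctuation-terminated
-- segments and then enumerating each segment from 0 (objective: alternative decomposition, same cost).
-- Both Pythons raise IndexError on train-mode lines with fewer than two tab fields; Pre_ excludes those.

-- ===== PORT A =====
-- s.split(sep) for a nonempty literal sep (PySem.Str.split? is none only for sep = "")
def pvSplit (s sep : String) : List String := (PySem.Str.split? s sep).getD []

def pvPunct : PySem.Set String :=
  PySem.Set.ofList [".","·","·",":",",","-","ⲻ","·ⲻ","⳾","?",".ⲻ","—","†","=","]","⸱","].","⸓","⳾ⲻ","[","--","·]","··","☧",".]]","[·]","ⲻ·","=–.","̣","."]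

-- one iteration of A's loop body (state = (output, counter))
def pvStepA (train : Bool) (st : List String × Int) (line : String) : List String × Int :=
  let fields := pvSplit line "\t"
  let output := st.1 ++ [if train then
      PySem.Str.join "\t" [PySem.Int.toStr st.2, PySem.List.pyGetD fields 0 "",
                           PySem.List.pyGetD fields 1 "", "_"]
    else line]
  let counter := st.2 + 1
  if PySem.Set.contains pvPunct (PySem.List.pyGetD fields 0 "") then (output ++ [""], 0)
  else (output, counter)

def marmotify (indata : String) (train : Bool) : String :=
  let st := (pvSplit (PySem.Str.strip indata) "\n").foldl (pvStepA train) ([], 0)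
  PySem.Str.join "\n" st.1 ++ "\n"

-- ===== PORT B =====
-- phase 1 of Source B: partition the lines into (segment, ended_on_punct) runs
def pvSegmentize : List String → List String → List (List String × Bool)
  | [], current => if current.isEmpty then [] else [(current, false)]
  | line :: rest, current =>
      let current' := current ++ [line]
      if PySem.Set.contains pvPunct
          (PySem.List.pyGetD (pvSplit line "\t") 0 "") then
        (current', true) :: pvSegmentize rest []
      else pvSegmentize rest current'

-- Source B's inner emission of one line at in-segment index i
def pvRow (train : Bool) (i : Int) (line : String) : String :=
  if train then
    let fields := pvSplit line "\t"
    PySem.Str.join "\t" [PySem.Int.toStr i, PySem.List.pyGetD fields 0 "",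
                         PySem.List.pyGetD fields 1 "", "_"]
  else line

def marmotify_alt (indata : String) (train : Bool) : String :=
  let segments := pvSegmentize (pvSplit (PySem.Str.strip indata) "\n") []
  let pieces := segments.foldl (fun acc seg =>
    acc ++ ((PySem.List.enumerate seg.1 0).map (fun p => pvRow train p.1 p.2) ++
            (if seg.2 then [""] else []))) []
  PySem.Str.join "\n" pieces ++ "\n"

-- ===== PRECONDITION & SPEC =====
-- Pre_ excludes exactly the inputs where A raises: in train mode every line must have ≥ 2 tab-separated fields (else fields[1] is an IndexError).
def Pre_marmotify (indata : String) (train : Bool) : Prop :=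
  train = true → ∀ line ∈ pvSplit (PySem.Str.strip indata) "\n",
    2 ≤ (pvSplit line "\t").length
instance (indata : String) (train : Bool) : Decidable (Pre_marmotify indata train) := by
  unfold Pre_marmotify; infer_instance

def pvWitness_marmotify : String × Bool := ("a\tN\n.\tPUNCT\nb\tV", true)

def Spec_marmotify (indata : String) (train : Bool) (out : String) : Prop := out = marmotify_alt indata train
instance (indata : String) (train : Bool) (out : String) : Decidable (Spec_marmotify indata train out) := by unfold Spec_marmotify; infer_instance

-- ===== CLAIM (what is proved, stated in full; the proofs are below) =====
def Claim_equal_marmotify : Prop := ∀ (indata : String) (train : Bool), Dom_marmotify indata train → Pre_marmotify indata train → Spec_marmotify indata train (marmotify indata train)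

-- ===== LEMMAS AND PROOFS =====

-- canonical emission: the pieces produced for the remaining lines, given the
-- current counter / in-segment index n
def pvP (train : Bool) : List String → Int → List String
  | [], _ => []
  | line :: rest, n =>
      pvRow train n line ::
        (if PySem.Set.contains pvPunct
            (PySem.List.pyGetD (pvSplit line "\t") 0 "") then
          "" :: pvP train rest 0
        else pvP train rest (n + 1))

lemma loopA_eq (train : Bool) : ∀ (ls out : List String) (c : Int),
    (ls.foldl (pvStepA train) (out, c)).1 = out ++ pvP train ls c := by
  intro ls
  induction ls with
  | nil => intro out c; simp [pvP]
  | cons l rest ih =>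
    intro out c
    simp only [List.foldl_cons, pvStepA, pvP, pvRow]
    split_ifs with h <;> simp [ih]

lemma emit_segments_eq (train : Bool) : ∀ (ls cur : List String),
    (pvSegmentize ls cur).flatMap (fun seg =>
        (PySem.List.enumerate seg.1 0).map (fun p => pvRow train p.1 p.2) ++
        (if seg.2 then [""] else []))
      = (PySem.List.enumerate cur 0).map (fun p => pvRow train p.1 p.2) ++
        pvP train ls (cur.length : Int) := by
  intro ls
  induction ls with
  | nil =>
    intro cur
    by_cases h : cur = []
    · simp [pvSegmentize, h, pvP]
    · simp [pvSegmentize, h, pvP, List.isEmpty_iff]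
  | cons l rest ih =>
    intro cur
    simp only [pvSegmentize]
    split_ifs with h
    · simp only [List.flatMap_cons, ih, pvP, h, if_pos,
        PySem.List.enumerate_append, List.map_append, PySem.List.enumerate_nil,
        PySem.List.enumerate_cons]
      simp
    · rw [ih, pvP]
      rw [if_neg h]
      simp only [PySem.List.enumerate_append, List.map_append, PySem.List.enumerate_cons,
        PySem.List.enumerate_nil, List.map_cons, List.map_nil, List.length_append,
        List.length_cons, List.length_nil, List.append_assoc]
      push_cast
      simp

-- ===== VERDICT (by name: the statement is the Claim_ definition above) =====
theorem marmotify_spec : Claim_equal_marmotify := by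
  intro indata train _ _
  unfold Spec_marmotify marmotify marmotify_alt
  dsimp only
  rw [PySem.List.foldl_append_eq_flatMap, loopA_eq, emit_segments_eq]
  simp [PySem.List.enumerate_nil]
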